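-- pv_equiv track=rewrite | github.com/oyDA/college_project | py_src/main.py | shift_row
-- ===== SOURCE A (Python) =====
-- def shift_row(row, shift):
--     result = list(row)
--     if shift != 0:
--         temp = result[0]
--
--         for i in range(3):
--             result[i] = result[i + 1]
--         result[3] = temp
--
--         return shift_row(result, shift - 1)
--
--     else:
--         return result
-- ===== SOURCE B (Python) =====
-- def shift_row(row, shift):
--     result = list(row)
--     if shift == 0:
--         return result
--     k = shift % 4
--     head = [result[(k + i) % 4] for i in range(4)]
--     return head + result[4:]
-- ===== Notes on version B (the rewrite author's own statement) =====
-- stated objective: alternative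
-- what changed: Replaces the per-unit-of-shift tail recursion (one single-position rotate per step) with a closed form: the first four elements are picked directly at indices (shift % 4 + i) % 4 and the tail reattached, no iteration over shift.
import Mathlib
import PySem

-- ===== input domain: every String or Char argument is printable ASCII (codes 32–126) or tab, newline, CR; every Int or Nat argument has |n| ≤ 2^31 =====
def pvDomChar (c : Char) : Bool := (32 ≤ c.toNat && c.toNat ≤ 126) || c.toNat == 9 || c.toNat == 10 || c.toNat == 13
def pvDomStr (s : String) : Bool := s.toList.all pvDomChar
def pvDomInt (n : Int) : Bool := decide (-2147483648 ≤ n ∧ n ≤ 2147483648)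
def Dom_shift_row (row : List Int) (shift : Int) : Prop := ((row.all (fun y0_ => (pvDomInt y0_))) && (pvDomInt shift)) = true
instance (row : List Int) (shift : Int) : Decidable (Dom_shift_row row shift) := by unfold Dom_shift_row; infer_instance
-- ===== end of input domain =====

-- B replaces A's per-unit-of-shift tail recursion by a closed form: the first four elements
-- are read directly at indices (shift % 4 + i) % 4, the tail is reattached unchanged.


-- ===== PORT A =====
-- one recursive step's body: temp = result[0]; for i in range(3): result[i] = result[i+1]; result[3] = temp
-- (pyGetD/pySetD with default are exact where the index is in range; out-of-range reads/writes
--  raise IndexError in Python and are excluded by Pre_shift_row)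
def shiftStepA (result : List Int) : List Int :=
  let temp := PySem.List.pyGetD result 0 0
  let result := (PySem.List.pyRange 0 3 1).foldl
    (fun r i => PySem.List.pySetD r i (PySem.List.pyGetD r (i + 1) 0)) result
  PySem.List.pySetD result 3 temp

-- the tail recursion `return shift_row(result, shift - 1)` counted down by shift.toNat;
-- for negative shift Python recurses forever (RecursionError), excluded by Pre_shift_row
def shiftRowRecA : List Int → Nat → List Int
  | result, 0 => result
  | result, n + 1 => shiftRowRecA (shiftStepA result) n

def shift_row (row : List Int) (shift : Int) : List Int :=
  shiftRowRecA row shift.toNat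

-- ===== PORT B =====
def shift_row_alt (row : List Int) (shift : Int) : List Int :=
  let result := row
  if shift == 0 then result
  else
    let k := PySem.Int.mod shift 4
    -- head = [result[(k + i) % 4] for i in range(4)]; result[...] raises IndexError on a row
    -- shorter than 4 (pyGetD's default is unreachable inside Pre_shift_row)
    let head := (PySem.List.pyRange 0 4 1).map
      (fun i => PySem.List.pyGetD result (PySem.Int.mod (k + i) 4) 0)
    head ++ PySem.List.slice result (some 4) none

-- ===== PRECONDITION & SPEC =====
-- Pre_ excludes exactly the inputs where Python A raises: negative shift (unbounded recursion,
-- RecursionError), nonzero shift on a row shorter than 4 (IndexError at result[3] / result[i+1]),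
-- and shift > 900 (CPython hits its recursion limit near depth 1000, RecursionError).
def Pre_shift_row (row : List Int) (shift : Int) : Prop :=
  0 ≤ shift ∧ shift ≤ 900 ∧ (shift = 0 ∨ 4 ≤ row.length)
instance (row : List Int) (shift : Int) : Decidable (Pre_shift_row row shift) := by
  unfold Pre_shift_row; infer_instance
def pvWitness_shift_row : List Int × Int := ([1, 2, 3, 4, 5], 3)

def Spec_shift_row (row : List Int) (shift : Int) (out : List Int) : Prop := out = shift_row_alt row shift
instance (row : List Int) (shift : Int) (out : List Int) : Decidable (Spec_shift_row row shift out) := by unfold Spec_shift_row; infer_instance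

-- ===== CLAIM (what is proved, stated in full; the proofs are below) =====
def Claim_equal_shift_row : Prop := ∀ (row : List Int) (shift : Int), Dom_shift_row row shift → Pre_shift_row row shift → Spec_shift_row row shift (shift_row row shift)

-- ===== LEMMAS AND PROOFS =====

-- one A-step on a row of length ≥ 4 is a single left rotation of the first four slots
theorem shiftStepA_cons (a b c d : Int) (t : List Int) :
    shiftStepA (a :: b :: c :: d :: t) = b :: c :: d :: a :: t := by
  show PySem.List.pySetD ((PySem.List.pyRange 0 3 1).foldl _ _) 3 _ = _
  rw [show PySem.List.pyRange 0 3 1 = [0, 1, 2] from by decide]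
  simp only [List.foldl_cons, List.foldl_nil]
  norm_num [PySem.List.pySetD_of_nonneg, PySem.List.pyGetD_of_nonneg,
    show Int.toNat 0 = 0 from rfl, show Int.toNat 1 = 1 from rfl,
    show Int.toNat 2 = 2 from rfl, show Int.toNat 3 = 3 from rfl]

-- drop-4 slice of an explicitly 4-long-prefixed row (used by the main proof)
theorem slice_from4 (a b c d : Int) (t : List Int) :
    PySem.List.slice (a :: b :: c :: d :: t) (some 4) none = t := by
  rw [show (4 : Int) = ((4 : Nat) : Int) from rfl, PySem.List.slice_from_natCast]
  rfl

-- closed form of A's recursion on a row of length ≥ 4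
theorem shiftRowRecA_closed (n : Nat) :
    ∀ (a b c d : Int) (t : List Int),
      shiftRowRecA (a :: b :: c :: d :: t) n =
        if n % 4 = 0 then a :: b :: c :: d :: t
        else if n % 4 = 1 then b :: c :: d :: a :: t
        else if n % 4 = 2 then c :: d :: a :: b :: t
        else d :: a :: b :: c :: t := by
  induction n with
  | zero => intro a b c d t; rfl
  | succ n ih =>
    intro a b c d t
    have h1 : shiftRowRecA (a :: b :: c :: d :: t) (n + 1)
        = shiftRowRecA (shiftStepA (a :: b :: c :: d :: t)) n := rfl
    rw [h1, shiftStepA_cons, ih b c d a t]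
    have := Nat.mod_lt n (show 0 < 4 by omega)
    have h4 : (n + 1) % 4 = (n % 4 + 1) % 4 := by omega
    rcases (show n % 4 = 0 ∨ n % 4 = 1 ∨ n % 4 = 2 ∨ n % 4 = 3 by omega) with h | h | h | h <;>
      simp [h, h4]

-- ===== VERDICT (by name: the statement is the Claim_ definition above) =====
theorem shift_row_spec : Claim_equal_shift_row := by
  intro row shift _ ⟨hpos, _, hcase⟩
  unfold Spec_shift_row
  by_cases h0 : shift = 0
  case pos => subst h0; rfl
  case neg =>
    have hlen : 4 ≤ row.length := hcase.resolve_left h0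
    obtain ⟨a, b, c, d, t, rfl⟩ : ∃ a b c d t, row = a :: b :: c :: d :: t := by
      rcases row with _ | ⟨a, _ | ⟨b, _ | ⟨c, _ | ⟨d, t⟩⟩⟩⟩ <;>
        first | exact ⟨a, b, c, d, t, rfl⟩ | simp at hlen
    have hmod : PySem.Int.mod shift 4 = ((shift.toNat % 4 : Nat) : Int) := by
      rw [PySem.Int.mod_eq_emod_of_pos (by omega)]
      omega
    have := Nat.mod_lt shift.toNat (show 0 < 4 by omega)
    rcases (show shift.toNat % 4 = 0 ∨ shift.toNat % 4 = 1 ∨ shift.toNat % 4 = 2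
        ∨ shift.toNat % 4 = 3 by omega) with h | h | h | h <;>
    · simp only [shift_row, shift_row_alt, beq_iff_eq, if_neg h0]
      rw [shiftRowRecA_closed, hmod, h,
        show PySem.List.pyRange 0 4 1 = [0, 1, 2, 3] from by decide,
        slice_from4]
      norm_num [PySem.List.pyGetD_of_nonneg, show Int.toNat 4 = 4 from rfl,
        show PySem.Int.mod 0 4 = 0 from by decide, show PySem.Int.mod 1 4 = 1 from by decide,
        show PySem.Int.mod 2 4 = 2 from by decide, show PySem.Int.mod 3 4 = 3 from by decide,
        show PySem.Int.mod 4 4 = 0 from by decide, show PySem.Int.mod 5 4 = 1 from by decide,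
        show PySem.Int.mod 6 4 = 2 from by decide,
        show Int.toNat 0 = 0 from rfl, show Int.toNat 1 = 1 from rfl,
        show Int.toNat 2 = 2 from rfl, show Int.toNat 3 = 3 from rfl]
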